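-- pv_equiv track=rewrite | github.com/AlanCienega/ghost-wise | weights.py | calculate_entity_weights
-- ===== SOURCE A (Python) =====
-- def calculate_entity_weights(entities):
--     num_entities = len(entities)
--     max_weight = 5
--     min_weight = 1
--     weights = {}
--
--     if num_entities == 0:
--         return weights
--
--     # Calcular el rango de pesos
--     weight_range = max_weight - min_weight + 1
--
--     # Calcular el paso entre cada nivel de peso
--     step = num_entities // weight_range
--
--     # Asignar pesos a las entidades
--     current_weight = max_weight
--     current_step = 1
--     for entity in entities:
--         weights[entity] = current_weight
--         current_step += 1
--         if current_step > step:
--             current_weight -= 1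
--             current_step = 1
--
--     return weights
-- ===== SOURCE B (Python) =====
-- def calculate_entity_weights(entities):
--     if not entities:
--         return {}
--     step = max(1, len(entities) // 5)
--     weights = {}
--     weight = 5
--     rest = entities
--     while rest:
--         block, rest = rest[:step], rest[step:]
--         for entity in block:
--             weights[entity] = weight
--         weight -= 1
--     return weights
-- ===== Notes on version B (the rewrite author's own statement) =====
-- stated objective: alternative
-- what changed: Replaces A's single pass with a per-entity current_weight/current_step counter state machine by a staged block decomposition: the list is repeatedly sliced into blocks of size max(1, n//5) and each whole block is assigned one weight, decremented between blocks.
import Mathlib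
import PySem

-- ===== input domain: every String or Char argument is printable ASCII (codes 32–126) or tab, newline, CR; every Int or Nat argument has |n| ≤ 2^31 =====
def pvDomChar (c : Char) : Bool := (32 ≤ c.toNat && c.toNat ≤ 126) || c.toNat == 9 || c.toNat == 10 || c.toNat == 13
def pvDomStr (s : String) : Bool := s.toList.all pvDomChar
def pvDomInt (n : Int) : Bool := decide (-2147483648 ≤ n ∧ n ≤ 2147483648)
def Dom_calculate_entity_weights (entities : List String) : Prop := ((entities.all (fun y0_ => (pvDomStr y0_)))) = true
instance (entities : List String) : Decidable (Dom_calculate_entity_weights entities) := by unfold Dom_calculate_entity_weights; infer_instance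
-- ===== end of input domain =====

-- B replaces A's per-entity current_weight/current_step counter state machine with a staged
-- block decomposition: repeatedly slice off a block of size max(1, n//5) and assign the whole
-- block one weight, decrementing between blocks (objective: alternative; same O(n) cost).


-- ===== PORT A =====
-- the loop body of A: insert the entity at current_weight, advance current_step,
-- and on overflow of step decrement current_weight and reset current_step
def pvStepA (step : Int) (st : PySem.Dict String Int × Int × Int) (entity : String) :
    PySem.Dict String Int × Int × Int :=
  let weights := st.1.insert entity st.2.1
  let current_step := st.2.2 + 1
  if current_step > step then (weights, st.2.1 - 1, 1) else (weights, st.2.1, current_step)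

def calculate_entity_weights (entities : List String) : List (String × Int) :=
  let num_entities : Int := entities.length
  let max_weight : Int := 5
  let min_weight : Int := 1
  if num_entities == 0 then (PySem.Dict.empty : PySem.Dict String Int).items
  else
    let weight_range := max_weight - min_weight + 1
    let step := PySem.Int.floordiv num_entities weight_range
    (entities.foldl (pvStepA step) (PySem.Dict.empty, max_weight, 1)).1.items

-- ===== PORT B =====
-- the while loop of B: rest is nonempty here, so rest[:step] = x :: rest'.take (step-1)
-- and rest[step:] = rest'.drop (step-1) where rest = x :: rest' (exact for step ≥ 1,
-- which max(1, …) guarantees at the call site)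
def pvBlocks (step : Nat) : List String → Int → PySem.Dict String Int → PySem.Dict String Int
  | [], _, d => d
  | x :: rest, weight, d =>
      pvBlocks step (rest.drop (step - 1)) (weight - 1)
        ((x :: rest.take (step - 1)).foldl (fun d e => d.insert e weight) d)
termination_by rest => rest.length
decreasing_by simp [List.length_drop]

def calculate_entity_weights_alt (entities : List String) : List (String × Int) :=
  if entities.isEmpty then []
  else
    let step := max 1 (entities.length / 5)
    (pvBlocks step entities 5 PySem.Dict.empty).items

-- ===== PRECONDITION & SPEC =====
def Spec_calculate_entity_weights (entities : List String) (out : List (String × Int)) : Prop := out = calculate_entity_weights_alt entities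
instance (entities : List String) (out : List (String × Int)) : Decidable (Spec_calculate_entity_weights entities out) := by unfold Spec_calculate_entity_weights; infer_instance

-- ===== CLAIM (what is proved, stated in full; the proofs are below) =====
def Claim_equal_calculate_entity_weights : Prop := ∀ (entities : List String), Dom_calculate_entity_weights entities → Spec_calculate_entity_weights entities (calculate_entity_weights entities)

-- ===== LEMMAS AND PROOFS =====

-- invariant for A: after i entities, A's state is (d, 5 - i/s, i % s + 1) where s = max 1 step
theorem pv_loop_eq (step : Int) (hstep : 0 ≤ step) (s : Nat) (hs : (s : Int) = max 1 step) :
    ∀ (xs : List String) (i : Nat) (d : PySem.Dict String Int),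
    (xs.foldl (pvStepA step) (d, 5 - ((i / s : Nat) : Int), ((i % s : Nat) : Int) + 1)).1
      = (PySem.List.enumerate xs (i : Int)).foldl
          (fun d p => d.insert p.2 (5 - PySem.Int.floordiv p.1 (max 1 step))) d := by
  intro xs
  have hs1 : 1 ≤ s := by omega
  induction xs with
  | nil => intro i d; simp [PySem.List.enumerate_nil]
  | cons x xs ih =>
    intro i d
    rw [PySem.List.enumerate_cons]
    simp only [List.foldl_cons]
    have hfd : PySem.Int.floordiv (i : Int) (max 1 step) = ((i / s : Nat) : Int) := by
      rw [← hs]; exact PySem.Int.floordiv_natCast i s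
    rw [hfd]
    show (List.foldl (pvStepA step) (pvStepA step (d, _, _) x) xs).1 = _
    simp only [pvStepA]
    by_cases h : ((i % s : Nat) : Int) + 1 + 1 > step
    · -- reset: i % s = s - 1, so (i+1) % s = 0 and (i+1)/s = i/s + 1
      rw [if_pos h]
      have hr : i % s = s - 1 := by
        by_cases h1 : step ≤ 1
        · have hs1' : s = 1 := by omega
          simp [hs1', Nat.mod_one]
        · have hss : (s : Int) = step := by omega
          have := Nat.mod_lt i (show 0 < s by omega)
          omega
      have hi1 : i + 1 = s * (i / s + 1) := by
        have hq := Nat.div_add_mod i s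
        rw [Nat.mul_succ]; omega
      have hmod : (i + 1) % s = 0 := by rw [hi1]; exact Nat.mul_mod_right _ _
      have hdiv : (i + 1) / s = i / s + 1 := by
        rw [hi1]; exact Nat.mul_div_cancel_left _ (by omega)
      have := ih (i + 1) (d.insert x (5 - ((i / s : Nat) : Int)))
      rw [hmod, hdiv] at this
      simp only [Nat.cast_add, Nat.cast_one, Nat.cast_zero] at this
      rw [show ((0 : Int) + 1) = 1 from rfl,
        show (5 : Int) - (((i / s : Nat) : Int) + 1) = 5 - ((i / s : Nat) : Int) - 1 from by ring]
        at this
      exact this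
    · -- no reset: i % s + 1 < s, so (i+1) % s = i % s + 1 and (i+1)/s = i/s
      rw [if_neg h]
      have h2 : ((s : Int)) = step := by
        by_cases h1 : step ≤ 1
        · exfalso
          have : s = 1 := by omega
          apply h; omega
        · omega
      have hlt : i % s + 1 < s := by
        have := Nat.mod_lt i (show 0 < s by omega); omega
      have hmod : (i + 1) % s = i % s + 1 := by
        rw [Nat.add_mod]
        simp [Nat.mod_eq_of_lt hlt, Nat.mod_eq_of_lt (show 1 < s by omega)]
      have hdiv : (i + 1) / s = i / s := by
        have hmul : s * ((i + 1) / s) = s * (i / s) := by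
          have ha := Nat.div_add_mod (i + 1) s
          have hb := Nat.div_add_mod i s
          omega
        exact Nat.eq_of_mul_eq_mul_left (by omega) hmul
      have := ih (i + 1) (d.insert x (5 - ((i / s : Nat) : Int)))
      rw [hmod, hdiv] at this
      simp only [Nat.cast_add, Nat.cast_one] at this
      exact this

-- within a block (all indices below s) the closed-form fold inserts the constant weight w
theorem pv_fold_const (s : Nat) (w : Int) :
    ∀ (ys : List String) (k : Nat) (d : PySem.Dict String Int), k + ys.length ≤ s →
    (PySem.List.enumerate ys (k : Int)).foldl
        (fun d p => d.insert p.2 (w - PySem.Int.floordiv p.1 (s : Int))) d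
      = ys.foldl (fun d e => d.insert e w) d := by
  intro ys
  induction ys with
  | nil => intro k d _; simp [PySem.List.enumerate_nil]
  | cons y ys ih =>
    intro k d hk
    rw [PySem.List.enumerate_cons]
    simp only [List.foldl_cons]
    have h0 : PySem.Int.floordiv (k : Int) (s : Int) = ((k / s : Nat) : Int) :=
      PySem.Int.floordiv_natCast k s
    have hks : k / s = 0 := Nat.div_eq_of_lt (by simp at hk; omega)
    rw [h0, hks]
    have := ih (k + 1) (d.insert y (w - ((0 : Nat) : Int))) (by simp at hk ⊢; omega)
    simp only [Nat.cast_add, Nat.cast_one, Nat.cast_zero] at this ⊢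
    rw [show w - (0 : Int) = w from by ring] at this ⊢
    exact this

-- shifting the start index by s decrements the closed-form weight by one
theorem pv_fold_shift (s : Nat) (hs : 1 ≤ s) (w : Int) :
    ∀ (ys : List String) (j : Nat) (d : PySem.Dict String Int),
    (PySem.List.enumerate ys ((s + j : Nat) : Int)).foldl
        (fun d p => d.insert p.2 (w - PySem.Int.floordiv p.1 (s : Int))) d
      = (PySem.List.enumerate ys ((j : Nat) : Int)).foldl
        (fun d p => d.insert p.2 ((w - 1) - PySem.Int.floordiv p.1 (s : Int))) d := by
  intro ys
  induction ys with
  | nil => intro j d; simp [PySem.List.enumerate_nil]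
  | cons y ys ih =>
    intro j d
    rw [PySem.List.enumerate_cons, PySem.List.enumerate_cons]
    simp only [List.foldl_cons]
    have h1 : PySem.Int.floordiv ((s + j : Nat) : Int) (s : Int) = (((s + j) / s : Nat) : Int) :=
      PySem.Int.floordiv_natCast _ s
    have h2 : PySem.Int.floordiv ((j : Nat) : Int) (s : Int) = ((j / s : Nat) : Int) :=
      PySem.Int.floordiv_natCast _ s
    have hdiv : (s + j) / s = 1 + j / s := by
      rw [Nat.add_div_left _ (by omega), Nat.add_comm]
    rw [h1, h2, hdiv]
    have hw : w - ((1 + j / s : Nat) : Int) = (w - 1) - ((j / s : Nat) : Int) := by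
      push_cast; ring
    rw [hw]
    have := ih (j + 1) (d.insert y ((w - 1) - ((j / s : Nat) : Int)))
    rw [show ((s + j : Nat) : Int) + 1 = ((s + (j + 1) : Nat) : Int) from by push_cast; ring,
        show ((j : Nat) : Int) + 1 = (((j + 1 : Nat)) : Int) from by push_cast; ring]
    exact this

-- B's block recursion equals the closed-form enumerate fold
theorem pvBlocks_eq (s : Nat) (hs : 1 ≤ s) :
    ∀ (xs : List String) (w : Int) (d : PySem.Dict String Int),
    pvBlocks s xs w d = (PySem.List.enumerate xs 0).foldl
        (fun d p => d.insert p.2 (w - PySem.Int.floordiv p.1 (s : Int))) d := by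
  have H : ∀ (n : Nat) (xs : List String), xs.length ≤ n →
      ∀ (w : Int) (d : PySem.Dict String Int),
      pvBlocks s xs w d = (PySem.List.enumerate xs 0).foldl
        (fun d p => d.insert p.2 (w - PySem.Int.floordiv p.1 (s : Int))) d := by
    intro n
    induction n with
    | zero =>
      intro xs hx w d
      have : xs = [] := List.eq_nil_of_length_eq_zero (by omega)
      subst this
      simp [pvBlocks, PySem.List.enumerate_nil]
    | succ n ih =>
      intro xs hx w d
      cases xs with
      | nil => simp [pvBlocks, PySem.List.enumerate_nil]
      | cons x rest =>
        rw [pvBlocks]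
        have hsplit : x :: rest = (x :: rest.take (s - 1)) ++ rest.drop (s - 1) := by
          simp
        rw [show PySem.List.enumerate (x :: rest) 0
              = PySem.List.enumerate ((x :: rest.take (s - 1)) ++ rest.drop (s - 1)) 0 from by
            rw [← hsplit]]
        rw [PySem.List.enumerate_append, List.foldl_append]
        have hconst := pv_fold_const s w (x :: rest.take (s - 1)) 0
          (d := d) (by simp; omega)
        rw [show ((0 : Nat) : Int) = (0 : Int) from rfl] at hconst
        rw [hconst]
        by_cases hrest : rest.drop (s - 1) = []
        · rw [hrest]
          simp [PySem.List.enumerate_nil, pvBlocks]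
        · have hlong : s - 1 < rest.length := by
            by_contra hc
            exact hrest (List.drop_eq_nil_of_le (by omega))
          have hblen : (0 : Int) + ((x :: rest.take (s - 1)).length : Int) = ((s : Nat) : Int) := by
            simp [Nat.min_comm]
            omega
          rw [hblen]
          have hshift := pv_fold_shift s hs w (rest.drop (s - 1)) 0
            (d := (x :: rest.take (s - 1)).foldl (fun d e => d.insert e w) d)
          rw [show ((s + 0 : Nat) : Int) = ((s : Nat) : Int) from by norm_num] at hshift
          rw [show ((0 : Nat) : Int) = (0 : Int) from rfl] at hshift
          rw [hshift]
          exact ih (rest.drop (s - 1)) (by simp at hx ⊢; omega) (w - 1) _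
  exact fun xs => H xs.length xs le_rfl

-- ===== VERDICT (by name: the statement is the Claim_ definition above) =====
theorem calculate_entity_weights_spec : Claim_equal_calculate_entity_weights := by
  intro entities _
  unfold Spec_calculate_entity_weights calculate_entity_weights calculate_entity_weights_alt
  by_cases hn : entities = []
  · subst hn; simp [PySem.Dict.empty]
  · have hne : ((entities.length : Int) == 0) = false := by
      simp [List.length_eq_zero_iff, hn]
    have hne' : entities.isEmpty = false := by simp [hn]
    rw [hne', if_neg (by simp [hne])]
    simp only [Bool.false_eq_true, if_false]
    have hstep5 : PySem.Int.floordiv (entities.length : Int) ((5 : Int) - 1 + 1) =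
        ((entities.length / 5 : Nat) : Int) := by
      rw [show ((5 : Int) - 1 + 1) = ((5 : Nat) : Int) from by norm_num]
      exact PySem.Int.floordiv_natCast entities.length 5
    have hcast : ((max 1 (entities.length / 5) : Nat) : Int)
        = max 1 (PySem.Int.floordiv (entities.length : Int) ((5 : Int) - 1 + 1)) := by
      rw [hstep5]; push_cast; omega
    have hA := pv_loop_eq (PySem.Int.floordiv (entities.length : Int) ((5 : Int) - 1 + 1))
      (by rw [hstep5]; exact Int.natCast_nonneg _) (max 1 (entities.length / 5)) hcast
      entities 0 PySem.Dict.empty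
    rw [show ((0 / max 1 (entities.length / 5) : Nat) : Int) = (0 : Int) from by simp,
        show ((0 % max 1 (entities.length / 5) : Nat) : Int) = (0 : Int) from by simp,
        show (5 : Int) - 0 = 5 from by ring, show (0 : Int) + 1 = 1 from by ring,
        show ((0 : Nat) : Int) = (0 : Int) from rfl] at hA
    have hB := pvBlocks_eq (max 1 (entities.length / 5)) (by omega) entities 5 PySem.Dict.empty
    rw [hcast] at hB
    rw [hA, ← hB]
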